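-- pv_equiv track=rewrite | github.com/logicalmechanism/convert-expression | scripts/py/create_token_proof.py | from_int
-- ===== SOURCE A (Python) =====
-- def from_int(integer):
--     base_256 = []
--     while integer > 0:
--         remainder = integer % 256
--         base_256.append(remainder)
--         integer = integer // 256
--
--     # Convert the list of remainders to bytes
--     byteArray = bytes(reversed(base_256)).hex()
--     return byteArray
-- ===== SOURCE B (Python) =====
-- def from_int(integer):
--     if integer <= 0:
--         return ''
--     length = (integer.bit_length() + 7) // 8
--     return integer.to_bytes(length, 'big').hex()
-- ===== Notes on version B (the rewrite author's own statement) =====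
-- stated objective: idiomatic
-- what changed: Replaces the manual base-256 modulo/divide loop plus reversed-list bytes construction with the stdlib closed form int.to_bytes of bit_length rounded up to whole bytes, big-endian, then .hex(), guarded by an explicit empty-string return for non-positive input.
import Mathlib
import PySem

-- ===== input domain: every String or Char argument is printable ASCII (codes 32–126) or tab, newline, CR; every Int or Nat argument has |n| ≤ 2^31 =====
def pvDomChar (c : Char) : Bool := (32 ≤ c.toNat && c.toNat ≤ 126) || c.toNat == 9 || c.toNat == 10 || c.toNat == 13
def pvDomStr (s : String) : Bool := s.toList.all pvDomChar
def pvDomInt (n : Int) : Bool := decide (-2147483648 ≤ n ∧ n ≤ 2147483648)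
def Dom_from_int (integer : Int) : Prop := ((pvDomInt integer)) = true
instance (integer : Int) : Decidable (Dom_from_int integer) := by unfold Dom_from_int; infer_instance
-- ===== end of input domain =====

-- B replaces A's manual base-256 digit loop with the idiomatic closed form
-- to_bytes((bit_length()+7)//8, 'big').hex(); equivalence of return values is proved below.

-- ===== PORT A =====
-- shared port of Python's bytes.hex() rendering of one byte (two lowercase hex digits); exact for 0 ≤ b < 256
def pvHexDigit (k : Nat) : Char := if k < 10 then Char.ofNat (48 + k) else Char.ofNat (87 + k)
def pvByteHex (b : Int) : List Char := [pvHexDigit (b.toNat / 16), pvHexDigit (b.toNat % 16)]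

-- the while loop: appends integer % 256 (LSB first) while integer > 0
def fromIntDigits (integer : Int) : List Int :=
  if _h : integer > 0 then
    PySem.Int.mod integer 256 :: fromIntDigits (PySem.Int.floordiv integer 256)
  else []
termination_by integer.toNat
decreasing_by
  have h2 : PySem.Int.floordiv integer 256 = integer / 256 :=
    PySem.Int.floordiv_eq_ediv_of_pos (by omega)
  rw [h2]
  omega

def from_int (integer : Int) : String :=
  String.ofList (((fromIntDigits integer).reverse).flatMap pvByteHex)

-- ===== PORT B =====
-- integer.to_bytes(len, 'big'): big-endian list of len bytes
def toBytesBE (len : Nat) (n : Int) : List Int :=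
  match len with
  | 0 => []
  | k + 1 => toBytesBE k (PySem.Int.floordiv n 256) ++ [PySem.Int.mod n 256]

def from_int_alt (integer : Int) : String :=
  if integer ≤ 0 then ""
  else
    -- (integer.bit_length() + 7) // 8 : both operands nonnegative, so Nat division is Python's //
    String.ofList ((toBytesBE ((PySem.Int.bitLength integer + 7) / 8) integer).flatMap pvByteHex)

-- ===== PRECONDITION & SPEC =====
def Spec_from_int (integer : Int) (out : String) : Prop := out = from_int_alt integer
instance (integer : Int) (out : String) : Decidable (Spec_from_int integer out) := by unfold Spec_from_int; infer_instance

-- ===== CLAIM (what is proved, stated in full; the proofs are below) =====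
def Claim_equal_from_int : Prop := ∀ (integer : Int), Dom_from_int integer → Spec_from_int integer (from_int integer)

-- ===== LEMMAS AND PROOFS =====

theorem fromIntDigits_nonpos {n : Int} (h : ¬ n > 0) : fromIntDigits n = [] := by
  rw [fromIntDigits]; simp [h]

theorem fromIntDigits_pos {n : Int} (h : n > 0) :
    fromIntDigits n = PySem.Int.mod n 256 :: fromIntDigits (PySem.Int.floordiv n 256) := by
  rw [fromIntDigits]; simp [h]

-- toBytesBE at exactly the digit count equals the reversed digit list
theorem toBytesBE_eq_reverse_digits : ∀ (L : Nat) (n : Int), 0 ≤ n →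
    L = (fromIntDigits n).length → toBytesBE L n = (fromIntDigits n).reverse := by
  intro L
  induction L with
  | zero =>
    intro n _ hlen
    have : fromIntDigits n = [] := List.eq_nil_of_length_eq_zero hlen.symm
    simp [toBytesBE, this]
  | succ k ih =>
    intro n hn hlen
    have hpos : n > 0 := by
      by_contra h
      rw [fromIntDigits_nonpos h] at hlen
      simp at hlen
    have hq0 : 0 ≤ PySem.Int.floordiv n 256 := by
      rw [PySem.Int.floordiv_eq_ediv_of_pos (by omega)]
      exact Int.ediv_nonneg (by omega) (by omega)
    have hlen' : k = (fromIntDigits (PySem.Int.floordiv n 256)).length := by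
      rw [fromIntDigits_pos hpos] at hlen; simpa using hlen
    have hstep : toBytesBE (k + 1) n =
        toBytesBE k (PySem.Int.floordiv n 256) ++ [PySem.Int.mod n 256] := rfl
    rw [hstep, ih _ hq0 hlen', fromIntDigits_pos hpos, List.reverse_cons]

-- digit count = (bit_length + 7) // 8, on Nat inputs
theorem digits_length_natCast : ∀ (m : Nat), 0 < m →
    (fromIntDigits (m : Int)).length = (PySem.Int.bitLength (m : Int) + 7) / 8 := by
  intro m
  induction m using Nat.strong_induction_on with
  | _ m ih =>
    intro hm
    have hpos : (m : Int) > 0 := by exact_mod_cast hm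
    have hfd : PySem.Int.floordiv (m : Int) 256 = ((m / 256 : Nat) : Int) := by
      exact_mod_cast PySem.Int.floordiv_natCast m 256
    rw [fromIntDigits_pos hpos, hfd]
    by_cases hsmall : m < 256
    · -- single digit: m / 256 = 0, and 1 ≤ bitLength m ≤ 8
      have h0 : m / 256 = 0 := Nat.div_eq_of_lt hsmall
      rw [h0]
      have hbl_le : PySem.Int.bitLength (m : Int) ≤ 8 := by
        by_contra hc
        have := PySem.Int.two_pow_bitLength_le (n := (m : Int)) (by exact_mod_cast hm.ne')
        have habs : (m : Int).natAbs = m := Int.natAbs_natCast m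
        rw [habs] at this
        have : 2 ^ 8 ≤ m := le_trans (Nat.pow_le_pow_right (by norm_num) (by omega)) this
        omega
      have hbl_ge : 1 ≤ PySem.Int.bitLength (m : Int) := by
        by_contra hc
        have hlt2 := PySem.Int.lt_two_pow_bitLength (n := (m : Int))
        have habs : (m : Int).natAbs = m := Int.natAbs_natCast m
        have hz : PySem.Int.bitLength (m : Int) = 0 := by omega
        rw [habs, hz, pow_zero] at hlt2
        omega
      simp [fromIntDigits_nonpos (by norm_num : ¬ (0:Int) > 0)]
      omega
    · -- m ≥ 256: recurse, and bitLength m = bitLength (m/256) + 8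
      have hq : 0 < m / 256 := Nat.div_pos (by omega) (by norm_num)
      have hlt : m / 256 < m := Nat.div_lt_self hm (by norm_num)
      have ihq := ih (m / 256) hlt hq
      -- unroll bitLength halving 8 times
      have step : ∀ (k : Nat), 0 < k → PySem.Int.bitLength (k : Int) =
          PySem.Int.bitLength ((k / 2 : Nat) : Int) + 1 := fun k hk =>
        PySem.Int.bitLength_natCast hk
      have hbl : PySem.Int.bitLength (m : Int) =
          PySem.Int.bitLength ((m / 256 : Nat) : Int) + 8 := by
        have h1 : 0 < m := hm
        have h2 : 0 < m / 2 := by omega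
        have h3 : 0 < m / 2 / 2 := by omega
        have h4 : 0 < m / 2 / 2 / 2 := by omega
        have h5 : 0 < m / 2 / 2 / 2 / 2 := by omega
        have h6 : 0 < m / 2 / 2 / 2 / 2 / 2 := by omega
        have h7 : 0 < m / 2 / 2 / 2 / 2 / 2 / 2 := by omega
        have h8 : 0 < m / 2 / 2 / 2 / 2 / 2 / 2 / 2 := by omega
        have e : m / 2 / 2 / 2 / 2 / 2 / 2 / 2 / 2 = m / 256 := by
          omega
        rw [step m h1, step _ h2, step _ h3, step _ h4, step _ h5, step _ h6, step _ h7,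
            step _ h8, e]
      rw [List.length_cons, ihq, hbl]
      omega

theorem from_int_eq_alt (n : Int) : from_int n = from_int_alt n := by
  by_cases h : n ≤ 0
  · unfold from_int from_int_alt
    rw [fromIntDigits_nonpos (by omega)]
    simp [h]
  · push_neg at h
    obtain ⟨m, rfl⟩ : ∃ m : Nat, n = (m : Int) := ⟨n.toNat, by omega⟩
    have hm : 0 < m := by exact_mod_cast h
    unfold from_int from_int_alt
    rw [if_neg (by omega),
        toBytesBE_eq_reverse_digits _ _ (by omega) (digits_length_natCast m hm).symm]

-- ===== VERDICT (by name: the statement is the Claim_ definition above) =====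
theorem from_int_spec : Claim_equal_from_int := by
  intro n _
  unfold Spec_from_int
  exact from_int_eq_alt n
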